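-- pv_equiv track=rewrite | github.com/cwaltz/EPIJudge | epi_judge_python/longest_nondecreasing_subsequence.py | longest_nondecreasing_subsequence_length
-- ===== SOURCE A (Python) =====
-- import bisect
-- from typing import List
--
-- def longest_nondecreasing_subsequence_length(nums: List[int]) -> int:
--     """
--     #16.12
--
--     Time complexity = O(n log n), where n = len(nums)
--     Space complexity = O(n) for sub array
--
--     Approach 3: Improve Approach 2 With Binary Search
--     Explanations:
--     https://leetcode.com/problems/longest-increasing-subsequence/solutions/1326308/C++Python-DP-Binary-Search-BIT-Solutions-Picture-explain-O(NlogN)/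
--
--     Test PASSED (200/200) [   5 us]
--     Average running time:    8 us
--     Median running time:     4 us
--     """
--     sub = []
--     for num in nums:  # O(n)
--         if not sub or sub[-1] <= num:
--             sub.append(num)
--         else:  # num < sub[-1]
--             # Find the index of the first element > num
--             i = bisect.bisect_right(sub, num)  # O(log n)
--             # Replace that element with num
--             sub[i] = num
--     return len(sub)
-- ===== SOURCE B (Python) =====
-- def longest_nondecreasing_subsequence_length(nums):
--     # Classic O(n^2) DP tabulation: best[k] = (nums[k], length of the longest
--     # nondecreasing subsequence ending at index k), with a running maximum.
--     best = []
--     ans = 0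
--     for x in nums:
--         m = 0
--         for v, l in best:
--             if v <= x and l > m:
--                 m = l
--         best.append((x, m + 1))
--         if m + 1 > ans:
--             ans = m + 1
--     return ans
-- ===== Notes on version B (the rewrite author's own statement) =====
-- stated objective: simpler
-- what changed: Replaced the patience-pile single pass with binary-search tail replacement by the classic O(n^2) DP tabulation that records, per index, the length of the longest nondecreasing subsequence ending there and keeps a running maximum.
import Mathlib
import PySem

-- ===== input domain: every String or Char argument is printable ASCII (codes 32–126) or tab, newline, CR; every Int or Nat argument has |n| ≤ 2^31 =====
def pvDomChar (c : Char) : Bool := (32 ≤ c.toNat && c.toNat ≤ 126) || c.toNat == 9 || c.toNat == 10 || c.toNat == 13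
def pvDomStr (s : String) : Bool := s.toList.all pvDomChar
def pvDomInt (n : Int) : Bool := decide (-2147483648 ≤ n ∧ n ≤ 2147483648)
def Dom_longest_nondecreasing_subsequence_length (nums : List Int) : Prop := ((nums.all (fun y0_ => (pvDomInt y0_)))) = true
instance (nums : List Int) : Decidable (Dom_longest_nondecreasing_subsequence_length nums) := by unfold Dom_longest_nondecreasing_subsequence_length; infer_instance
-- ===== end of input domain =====

-- B replaces A's patience-pile binary-search pass by the classic O(n^2) DP tabulation
-- (length of the longest nondecreasing subsequence ending at each index); simpler, not faster.

-- ===== PORT A =====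
-- one loop iteration of A: append num, or overwrite the first pile element > num (bisect_right)
def pvStepA (sub : List Int) (num : Int) : List Int :=
  match sub.getLast? with
  | none => sub ++ [num]          -- `not sub` (empty pile): append
  | some last =>
      if last ≤ num then sub ++ [num]
      else sub.set (PySem.List.bisectRight sub num) num

def longest_nondecreasing_subsequence_length (nums : List Int) : Int :=
  ((nums.foldl pvStepA []).length : Int)

-- ===== PORT B =====
-- one loop iteration of B: state = (best, ans); inner scan computes m = max dp value over
-- earlier entries with value ≤ x, then appends (x, m+1) and updates the running answer
def pvStepB (st : List (Int × Int) × Int) (x : Int) : List (Int × Int) × Int :=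
  let m := st.1.foldl (fun m vl => if vl.1 ≤ x ∧ vl.2 > m then vl.2 else m) 0
  (st.1 ++ [(x, m + 1)], if m + 1 > st.2 then m + 1 else st.2)

def longest_nondecreasing_subsequence_length_alt (nums : List Int) : Int :=
  (nums.foldl pvStepB (([] : List (Int × Int)), (0 : Int))).2

-- ===== PRECONDITION & SPEC =====
def Spec_longest_nondecreasing_subsequence_length (nums : List Int) (out : Int) : Prop := out = longest_nondecreasing_subsequence_length_alt nums
instance (nums : List Int) (out : Int) : Decidable (Spec_longest_nondecreasing_subsequence_length nums out) := by unfold Spec_longest_nondecreasing_subsequence_length; infer_instance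

-- ===== CLAIM (what is proved, stated in full; the proofs are below) =====
def Claim_equal_longest_nondecreasing_subsequence_length : Prop := ∀ (nums : List Int), Dom_longest_nondecreasing_subsequence_length nums → Spec_longest_nondecreasing_subsequence_length nums (longest_nondecreasing_subsequence_length nums)

-- ===== LEMMAS AND PROOFS =====

-- `EndsC s x`: s ++ [x] is a nondecreasing chain (a chain "ending in x")
def EndsC (s : List Int) (x : Int) : Prop := List.IsChain (· ≤ ·) (s ++ [x])

theorem endsC_nil (x : Int) : EndsC [] x := by simp [EndsC]

theorem endsC_concat {s : List Int} {v x : Int} (h : EndsC s v) (hvx : v ≤ x) :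
    EndsC (s ++ [v]) x := by
  unfold EndsC at *
  rw [List.isChain_append]
  refine ⟨h, by simp, ?_⟩
  simp [hvx]

theorem endsC_of_concat {s : List Int} {v x : Int} (h : EndsC (s ++ [v]) x) :
    EndsC s v ∧ v ≤ x := by
  unfold EndsC at *
  rw [List.isChain_append] at h
  refine ⟨h.1, ?_⟩
  have := h.2.2 v (by simp) x (by simp)
  exact this

-- position of the last element of a nonempty sublist
theorem sublist_last_pos {l p : List Int} (h : l.Sublist p) :
    ∀ s x, l = s ++ [x] → ∃ k, k < p.length ∧ p.getD k 0 = x ∧ s.Sublist (p.take k) := by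
  induction h with
  | slnil => intro s x hs; simp at hs
  | cons a h ih =>
      intro s x hs
      obtain ⟨k, hk, hx, hsub⟩ := ih s x hs
      exact ⟨k + 1, by simpa using hk, by simpa using hx, by simpa using hsub.cons a⟩
  | cons₂ a h ih =>
      intro s x hs
      cases s with
      | nil =>
          simp at hs
          exact ⟨0, by simp, by simp [hs.1], by simp⟩
      | cons b s' =>
          simp at hs
          obtain ⟨rfl, hs'⟩ := hs
          obtain ⟨k, hk, hx, hsub⟩ := ih s' x hs'
          exact ⟨k + 1, by simpa using hk, by simpa using hx, by simpa using hsub.cons₂ a⟩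

-- split a sublist of p ++ [a] that ends in x
theorem concat_sublist_concat {s p : List Int} {x a : Int} (h : (s ++ [x]).Sublist (p ++ [a])) :
    (s ++ [x]).Sublist p ∨ (x = a ∧ s.Sublist p) := by
  rcases List.sublist_append_iff.mp h with ⟨l₁, l₂, heq, h₁, h₂⟩
  rcases List.sublist_singleton.mp h₂ with rfl | rfl
  · left; rw [List.append_nil] at heq; rwa [heq]
  · right
    obtain ⟨rfl, hx⟩ := List.append_inj' heq (by simp)
    simp at hx
    exact ⟨hx, h₁⟩

-- nonempty chain decomposes as t ++ [y] with EndsC t y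
theorem chain_decomp {s : List Int} (hne : s ≠ []) (hc : List.IsChain (· ≤ ·) s) :
    ∃ t y, s = t ++ [y] ∧ EndsC t y := by
  refine ⟨s.dropLast, s.getLast hne, (List.dropLast_append_getLast hne).symm, ?_⟩
  unfold EndsC
  rw [List.dropLast_append_getLast hne]
  exact hc

-- ---------- invariant for A's fold ----------
def InvA (p sub : List Int) : Prop :=
  sub.Pairwise (· ≤ ·) ∧
  (∀ k, k < sub.length → ∃ s, (s ++ [sub.getD k 0]).Sublist p ∧ EndsC s (sub.getD k 0) ∧ s.length = k) ∧
  (∀ s x, (s ++ [x]).Sublist p → EndsC s x → s.length < sub.length ∧ sub.getD s.length 0 ≤ x)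

theorem invA_nil : InvA [] [] := by
  refine ⟨by simp, by simp, ?_⟩
  intro s x h _
  simp at h

-- index form of sortedness
theorem getD_sorted {sub : List Int} (hs : sub.Pairwise (· ≤ ·)) {j k : ℕ}
    (hjk : j ≤ k) (hk : k < sub.length) : sub.getD j 0 ≤ sub.getD k 0 := by
  rcases Nat.lt_or_ge j k with hlt | hge
  · rw [List.getD_eq_getElem _ _ (by omega), List.getD_eq_getElem _ _ hk]
    exact List.pairwise_iff_getElem.mp hs j k (by omega) hk hlt
  · have : j = k := by omega
    rw [this]

theorem last_eq {sub : List Int} {last : Int} (h : sub.getLast? = some last) :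
    0 < sub.length ∧ last = sub.getD (sub.length - 1) 0 := by
  have hne : sub ≠ [] := by
    intro hnil; rw [hnil] at h; simp at h
  have hlen : 0 < sub.length := List.length_pos_of_ne_nil hne
  rw [List.getLast?_eq_getElem?, List.getElem?_eq_getElem (by omega)] at h
  rw [List.getD_eq_getElem _ _ (by omega)]
  exact ⟨hlen, (Option.some_inj.mp h).symm⟩

theorem set_getD {sub : List Int} {i : ℕ} {num : Int} {k : ℕ} (hk : k < sub.length) :
    (sub.set i num).getD k 0 = if k = i then num else sub.getD k 0 := by
  rw [List.getD_eq_getElem _ _ (by simpa using hk), List.getElem_set]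
  split_ifs with h1 h2 h3
  · rfl
  · omega
  · omega
  · rw [List.getD_eq_getElem _ _ hk]

theorem invA_step {p sub : List Int} (num : Int) (h : InvA p sub) :
    InvA (p ++ [num]) (pvStepA sub num) := by
  obtain ⟨hsort, hreal, hbound⟩ := h
  unfold pvStepA
  -- s ++ [x] sublist of p extends to p ++ [num]
  have hext : ∀ l : List Int, l.Sublist p → l.Sublist (p ++ [num]) :=
    fun l hl => hl.trans (List.sublist_append_left p [num])
  cases hL : sub.getLast? with
  | none =>
      have hnil : sub = [] := by
        cases sub with
        | nil => rfl
        | cons a l => simp at hL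
      subst hnil
      refine ⟨by simp, ?_, ?_⟩
      · intro k hk
        simp only [List.length_append, List.length_nil, List.length_cons] at hk
        have hk0 : k = 0 := by omega
        subst hk0
        exact ⟨[], by simp, endsC_nil num, rfl⟩
      · intro s x hsub hend
        rcases concat_sublist_concat hsub with hsp | ⟨rfl, hsp⟩
        · exact absurd (hbound s x hsp hend).1 (by simp)
        · rcases eq_or_ne s [] with rfl | hne
          · exact ⟨by simp, by simp⟩
          · obtain ⟨t, y, rfl, htend⟩ := chain_decomp hne (List.isChain_append.mp hend).1
            exact absurd (hbound t y hsp htend).1 (by simp)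
  | some last =>
      obtain ⟨hpos, hlast⟩ := last_eq hL
      show InvA (p ++ [num]) (if last ≤ num then sub ++ [num] else sub.set (PySem.List.bisectRight sub num) num)
      split_ifs with hc
      · -- append branch
        have hub : ∀ j, j < sub.length → sub.getD j 0 ≤ num :=
          fun j hj => le_trans (hlast ▸ getD_sorted hsort (by omega) (by omega)) hc
        refine ⟨?_, ?_, ?_⟩
        · rw [List.pairwise_append]
          refine ⟨hsort, by simp, ?_⟩
          intro a ha b hb
          simp at hb
          subst hb
          obtain ⟨j, hj, rfl⟩ := List.mem_iff_getElem.mp ha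
          rw [← List.getD_eq_getElem _ 0 hj]
          exact hub j hj
        · intro k hk
          simp only [List.length_append, List.length_cons, List.length_nil] at hk
          rcases Nat.lt_or_ge k sub.length with hkl | hkl
          · obtain ⟨s, h1, h2, h3⟩ := hreal k hkl
            rw [List.getD_append _ _ _ _ hkl]
            exact ⟨s, hext _ h1, h2, h3⟩
          · have hkeq : k = sub.length := by omega
            subst hkeq
            have hget : (sub ++ [num]).getD sub.length 0 = num := by
              rw [List.getD_eq_getElem _ _ (by simp)]
              simp
            rw [hget]
            obtain ⟨s, h1, h2, h3⟩ := hreal (sub.length - 1) (by omega)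
            refine ⟨s ++ [sub.getD (sub.length - 1) 0], ?_, ?_, by simp [h3]; omega⟩
            · exact h1.append (List.Sublist.refl [num])
            · exact endsC_concat h2 (hlast ▸ hc)
        · intro s x hsub hend
          simp only [List.length_append, List.length_cons, List.length_nil]
          rcases concat_sublist_concat hsub with hsp | ⟨rfl, hsp⟩
          · obtain ⟨hlt, hle⟩ := hbound s x hsp hend
            rw [List.getD_append _ _ _ _ hlt]
            exact ⟨by omega, hle⟩
          · rcases eq_or_ne s [] with rfl | hne
            · refine ⟨by simp, ?_⟩
              simp only [List.length_nil]
              rw [List.getD_append _ _ _ _ hpos]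
              exact hub 0 hpos
            · obtain ⟨t, y, rfl, htend⟩ := chain_decomp hne (List.isChain_append.mp hend).1
              obtain ⟨-, hyx⟩ := endsC_of_concat hend
              obtain ⟨hlt, hle⟩ := hbound t y hsp htend
              have hslen : (t ++ [y]).length = t.length + 1 := by simp
              rw [hslen]
              refine ⟨by omega, ?_⟩
              rcases Nat.lt_or_ge (t.length + 1) sub.length with h1 | h1
              · rw [List.getD_append _ _ _ _ h1]
                exact hub _ h1
              · have : t.length + 1 = sub.length := by omega
                rw [this, List.getD_eq_getElem _ _ (by simp)]
                simp
      · -- replace branch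
        rw [not_le] at hc
        set i := PySem.List.bisectRight sub num with hi
        obtain ⟨hile, hlo, hhi⟩ := PySem.List.bisectRight_spec sub num hsort
        rw [← hi] at hile hlo hhi
        have hlo' : ∀ j, j < i → j < sub.length → sub.getD j 0 ≤ num := by
          intro j h1 h2
          rw [List.getD_eq_getElem _ _ h2]
          exact hlo j h2 h1
        have hhi' : ∀ j, i ≤ j → (hj : j < sub.length) → num < sub.getD j 0 := by
          intro j h1 h2
          rw [List.getD_eq_getElem _ _ h2]
          exact hhi j h2 h1
        have hilt : i < sub.length := by
          rcases Nat.lt_or_ge i sub.length with h1 | h1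
          · exact h1
          · exfalso
            have := hlo' (sub.length - 1) (by omega) (by omega)
            rw [← hlast] at this
            omega
        have hlen' : (sub.set i num).length = sub.length := by simp
        refine ⟨?_, ?_, ?_⟩
        · rw [List.pairwise_iff_getElem]
          intro a b ha hb hab
          rw [List.length_set] at ha hb
          rw [← List.getD_eq_getElem _ 0, ← List.getD_eq_getElem _ 0,
              set_getD ha, set_getD hb]
          split_ifs with h1 h2 h2
          · omega
          · subst h1
            exact le_of_lt (hhi' b (by omega) hb)
          · subst h2
            exact hlo' a (by omega) ha
          · exact getD_sorted hsort (by omega) hb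
        · intro k hk
          rw [hlen'] at hk
          rw [set_getD hk]
          split_ifs with hki
          · subst hki
            rcases Nat.eq_zero_or_pos i with hz | hp
            · exact ⟨[], by simp, endsC_nil num, by simp [hz]⟩
            · obtain ⟨s, h1, h2, h3⟩ := hreal (i - 1) (by omega)
              refine ⟨s ++ [sub.getD (i - 1) 0], ?_, ?_, by simp [h3]; omega⟩
              · exact h1.append (List.Sublist.refl [num])
              · exact endsC_concat h2 (hlo' (i - 1) (by omega) (by omega))
          · obtain ⟨s, h1, h2, h3⟩ := hreal k hk
            exact ⟨s, hext _ h1, h2, h3⟩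
        · intro s x hsub hend
          rw [hlen']
          rcases concat_sublist_concat hsub with hsp | ⟨rfl, hsp⟩
          · obtain ⟨hlt, hle⟩ := hbound s x hsp hend
            refine ⟨hlt, ?_⟩
            rw [set_getD hlt]
            split_ifs with h1
            · have h2 : num < sub.getD s.length 0 := by
                rw [h1]
                exact hhi' i (le_refl _) (h1 ▸ hlt)
              omega
            · exact hle
          · rcases eq_or_ne s [] with rfl | hne
            · refine ⟨hpos, ?_⟩
              simp only [List.length_nil]
              rw [set_getD hpos]
              split_ifs with h1
              · exact le_rfl
              · exact hlo' 0 (by omega) hpos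
            · obtain ⟨t, y, rfl, htend⟩ := chain_decomp hne (List.isChain_append.mp hend).1
              obtain ⟨-, hyx⟩ := endsC_of_concat hend
              obtain ⟨hlt, hle⟩ := hbound t y hsp htend
              have hti : t.length < i := by
                rcases Nat.lt_or_ge t.length i with h1 | h1
                · exact h1
                · exfalso
                  have := hhi' t.length h1 hlt
                  omega
              have hslen : (t ++ [y]).length = t.length + 1 := by simp
              rw [hslen]
              refine ⟨by omega, ?_⟩
              rw [set_getD (by omega)]
              split_ifs with h1
              · exact le_rfl
              · exact hlo' (t.length + 1) (by omega) (by omega)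

theorem invA_fold : ∀ (q p sub : List Int), InvA p sub → InvA (p ++ q) (q.foldl pvStepA sub) := by
  intro q
  induction q with
  | nil => intro p sub h; simpa using h
  | cons a q ih =>
      intro p sub h
      have := ih (p ++ [a]) (pvStepA sub a) (invA_step a h)
      simpa using this

-- ---------- invariant for B's fold ----------
def InvB (p : List Int) (st : List (Int × Int) × Int) : Prop :=
  st.1.map Prod.fst = p ∧
  (∀ k, k < st.1.length →
     (∃ s, s.Sublist (p.take k) ∧ EndsC s (st.1.getD k (0,0)).1 ∧ (st.1.getD k (0,0)).2 = (s.length : Int) + 1) ∧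
     (∀ s, s.Sublist (p.take k) → EndsC s (st.1.getD k (0,0)).1 → (s.length : Int) + 1 ≤ (st.1.getD k (0,0)).2)) ∧
  (∃ s, s.Sublist p ∧ List.IsChain (· ≤ ·) s ∧ st.2 = (s.length : Int)) ∧
  (∀ s, s.Sublist p → List.IsChain (· ≤ ·) s → (s.length : Int) ≤ st.2)

theorem invB_nil : InvB [] ([], 0) := by
  refine ⟨by simp, by simp, ⟨[], by simp⟩, ?_⟩
  intro s h _
  simp [List.sublist_nil.mp h]

-- the inner scan of B computes the maximum dp value over entries with value ≤ x
theorem fmax (x : Int) : ∀ (best : List (Int × Int)) (acc : Int),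
    acc ≤ best.foldl (fun m vl => if vl.1 ≤ x ∧ vl.2 > m then vl.2 else m) acc ∧
    (best.foldl (fun m vl => if vl.1 ≤ x ∧ vl.2 > m then vl.2 else m) acc = acc ∨
      ∃ vl ∈ best, vl.1 ≤ x ∧ vl.2 = best.foldl (fun m vl => if vl.1 ≤ x ∧ vl.2 > m then vl.2 else m) acc) ∧
    (∀ vl ∈ best, vl.1 ≤ x → vl.2 ≤ best.foldl (fun m vl => if vl.1 ≤ x ∧ vl.2 > m then vl.2 else m) acc) := by
  intro best
  induction best with
  | nil => intro acc; simp
  | cons vl rest ih =>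
      intro acc
      simp only [List.foldl_cons]
      obtain ⟨ih1, ih2, ih3⟩ := ih (if vl.1 ≤ x ∧ vl.2 > acc then vl.2 else acc)
      have hle : acc ≤ (if vl.1 ≤ x ∧ vl.2 > acc then vl.2 else acc) := by
        split_ifs with hc
        · omega
        · exact le_refl _
      refine ⟨le_trans hle ih1, ?_, ?_⟩
      · rcases ih2 with hsame | ⟨w, hw, hwx, hwv⟩
        · rw [hsame]
          split_ifs with hc
          · exact Or.inr ⟨vl, by simp, hc.1, rfl⟩
          · exact Or.inl rfl
        · exact Or.inr ⟨w, by simp [hw], hwx, hwv⟩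
      · intro w hw hwx
        rcases List.mem_cons.mp hw with rfl | hw'
        · refine le_trans ?_ ih1
          split_ifs with hc
          · exact le_refl _
          · have : ¬ w.2 > acc := fun hgt => hc ⟨hwx, hgt⟩
            omega
        · exact ih3 w hw' hwx

-- fst entries of best are exactly p
theorem best_fst {p : List Int} {best : List (Int × Int)} (hmap : best.map Prod.fst = p)
    {j : ℕ} (hj : j < best.length) : (best.getD j (0,0)).1 = p.getD j 0 := by
  subst hmap
  rw [List.getD_eq_getElem _ _ hj, List.getD_eq_getElem _ _ (by simpa using hj)]
  simp

-- take j p ++ [p[j]] is a sublist of p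
theorem take_concat_sublist {p : List Int} {j : ℕ} (hj : j < p.length) :
    (p.take j ++ [p.getD j 0]).Sublist p := by
  have : p.take j ++ [p.getD j 0] = p.take (j + 1) := by
    rw [List.take_succ]
    simp [List.getElem?_eq_getElem hj]
  rw [this]
  exact List.take_sublist _ _

theorem invB_step {p : List Int} {st : List (Int × Int) × Int} (x : Int) (h : InvB p st) :
    InvB (p ++ [x]) (pvStepB st x) := by
  obtain ⟨hmap, hent, ⟨s0, hs0, hs0c, hans⟩, hansmax⟩ := h
  obtain ⟨best, ans⟩ := st
  simp only at hmap hent hans hansmax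
  have hlen : best.length = p.length := by rw [← hmap]; simp
  unfold pvStepB
  simp only
  set m := best.foldl (fun m vl => if vl.1 ≤ x ∧ vl.2 > m then vl.2 else m) 0 with hm
  obtain ⟨hm0, hmwit, hmmax⟩ := fmax x best 0
  rw [← hm] at hm0 hmwit hmmax
  -- (a) realizability of the new entry: some chain ending in x of length m+1
  have hreal_new : ∃ s : List Int, s.Sublist p ∧ EndsC s x ∧ m = (s.length : Int) := by
    rcases hmwit with hz | ⟨vl, hvl, hvlx, hvlv⟩
    · exact ⟨[], by simp, endsC_nil x, by simp [hz]⟩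
    · obtain ⟨j, hj, hjv⟩ := List.mem_iff_getElem.mp hvl
      have hjd : best.getD j (0,0) = vl := by rw [List.getD_eq_getElem _ _ hj, hjv]
      obtain ⟨⟨s, hssub, hsend, hslen⟩, -⟩ := hent j hj
      rw [hjd] at hsend hslen
      have hjp : j < p.length := by omega
      have hv1 : vl.1 = p.getD j 0 := by rw [← hjd]; exact best_fst hmap hj
      refine ⟨s ++ [vl.1], ?_, endsC_concat hsend hvlx, ?_⟩
      · rw [hv1]
        exact (hssub.append (List.Sublist.refl _)).trans (by rw [← hv1, hv1]; exact take_concat_sublist hjp)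
      · rw [← hvlv, hslen]; simp only [List.length_append, List.length_cons, List.length_nil]; push_cast; ring
  -- (b) maximality of the new entry: every chain in p ending in x has length ≤ m
  have hmax_new : ∀ s : List Int, s.Sublist p → EndsC s x → (s.length : Int) ≤ m := by
    intro s hssub hsend
    rcases eq_or_ne s [] with rfl | hne
    · simpa using hm0
    · obtain ⟨t, y, rfl, htend⟩ := chain_decomp hne (by
        have : List.IsChain (fun a b => a ≤ b) (s ++ [x]) := hsend
        exact (List.isChain_append.mp this).1)
      obtain ⟨hty, hyx⟩ := endsC_of_concat hsend
      obtain ⟨j, hj, hjy, htsub⟩ := sublist_last_pos hssub t y rfl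
      have hjb : j < best.length := by omega
      obtain ⟨-, hmaxj⟩ := hent j hjb
      have hv1 : (best.getD j (0,0)).1 = y := by rw [best_fst hmap hjb, hjy]
      rw [hv1] at hmaxj
      have h1 : (t.length : Int) + 1 ≤ (best.getD j (0,0)).2 := hmaxj t htsub hty
      have h2 : (best.getD j (0,0)).2 ≤ m := by
        refine hmmax _ (List.getD_eq_getElem _ _ hjb ▸ List.getElem_mem hjb) ?_
        rw [hv1]; exact hyx
      simp only [List.length_append, List.length_cons, List.length_nil]
      push_cast
      omega
  refine ⟨by simp [hmap], ?_, ?_, ?_⟩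
  · -- per-entry invariant
    intro k hk
    simp only [List.length_append, List.length_cons, List.length_nil] at hk
    rcases Nat.lt_or_ge k best.length with hkl | hkl
    · -- old entries: statement unchanged
      have hget : (best ++ [(x, m + 1)]).getD k (0,0) = best.getD k (0,0) :=
        List.getD_append _ _ _ _ hkl
      have htake : (p ++ [x]).take k = p.take k :=
        List.take_append_of_le_length (by omega)
      rw [hget, htake]
      exact hent k hkl
    · -- the new entry
      have hkeq : k = best.length := by omega
      subst hkeq
      have hget : (best ++ [(x, m + 1)]).getD best.length (0,0) = (x, m + 1) := by
        rw [List.getD_eq_getElem _ _ (by simp)]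
        simp
      have htake : (p ++ [x]).take best.length = p := by
        rw [hlen, List.take_left]
      rw [hget, htake]
      constructor
      · obtain ⟨s, h1, h2, h3⟩ := hreal_new
        exact ⟨s, h1, h2, by rw [h3]⟩
      · intro s h1 h2
        have := hmax_new s h1 h2
        omega
  · -- the answer is realizable
    split_ifs with hc
    · obtain ⟨s, h1, h2, h3⟩ := hreal_new
      refine ⟨s ++ [x], h1.append (List.Sublist.refl _), h2, ?_⟩
      simp [h3]
    · exact ⟨s0, hs0.trans (by simp), hs0c, hans⟩
  · -- the answer is maximal
    intro s hssub hsc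
    have hans' : ans ≤ (if m + 1 > ans then m + 1 else ans) := by split_ifs <;> omega
    have hm1 : m + 1 ≤ (if m + 1 > ans then m + 1 else ans) := by split_ifs <;> omega
    rcases eq_or_ne s [] with rfl | hne
    · have : (0:Int) ≤ ans := by rw [hans]; positivity
      simpa using le_trans this hans'
    · obtain ⟨t, y, rfl, htend⟩ := chain_decomp hne hsc
      rcases concat_sublist_concat hssub with hsp | ⟨rfl, htp⟩
      · exact le_trans (hansmax _ hsp hsc) hans'
      · have := hmax_new t htp htend
        simp only [List.length_append, List.length_cons, List.length_nil]
        push_cast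
        omega

theorem invB_fold : ∀ (q p : List Int) (st : List (Int × Int) × Int),
    InvB p st → InvB (p ++ q) (q.foldl pvStepB st) := by
  intro q
  induction q with
  | nil => intro p st h; simpa using h
  | cons a q ih =>
      intro p st h
      have := ih (p ++ [a]) (pvStepB st a) (invB_step a h)
      simpa using this

-- ===== VERDICT (by name: the statement is the Claim_ definition above) =====
theorem longest_nondecreasing_subsequence_length_spec : Claim_equal_longest_nondecreasing_subsequence_length := by
  intro nums _
  unfold Spec_longest_nondecreasing_subsequence_length
  unfold longest_nondecreasing_subsequence_length longest_nondecreasing_subsequence_length_alt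
  have hA : InvA nums (nums.foldl pvStepA []) := by simpa using invA_fold nums [] [] invA_nil
  have hB : InvB nums (nums.foldl pvStepB ([], 0)) := by simpa using invB_fold nums [] ([], 0) invB_nil
  set sub := nums.foldl pvStepA [] with hsub
  set st := nums.foldl pvStepB ([], 0) with hst
  obtain ⟨-, hreal, hbound⟩ := hA
  obtain ⟨-, -, ⟨s, hs, hsc, hans⟩, hmax⟩ := hB
  -- sub.length ≤ st.2
  have h1 : (sub.length : Int) ≤ st.2 := by
    rcases Nat.eq_zero_or_pos sub.length with hz | hpos
    · rw [hz, hans]; simp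
    · obtain ⟨t, htsub, htend, htlen⟩ := hreal (sub.length - 1) (by omega)
      have hchain : List.IsChain (· ≤ ·) (t ++ [sub.getD (sub.length - 1) 0]) := htend
      have := hmax _ htsub hchain
      have hlen : (t ++ [sub.getD (sub.length - 1) 0]).length = sub.length := by
        simp [htlen]; omega
      rw [hlen] at this
      exact this
  -- st.2 ≤ sub.length
  have h2 : st.2 ≤ (sub.length : Int) := by
    rw [hans]
    rcases eq_or_ne s [] with rfl | hne
    · simp
    · obtain ⟨t, y, rfl, htend⟩ := chain_decomp hne hsc
      have := hbound t y hs htend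
      simp only [List.length_append, List.length_cons, List.length_nil]
      push_cast
      omega
  omega
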